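-- pv_equiv track=rewrite | github.com/pavansaij/Algorithms_In_Python | August_2020/girls_in_tech_hackathon.py | Optimal_Start_Place_Eval
-- ===== SOURCE A (Python) =====
-- def add_one_to_range(array, i, j):
--     array[i] += 1
--
--     if j < len(array)-1:
--         array[j+1] -= 1
--
-- def Optimal_Start_Place_Eval(delays, count):
--     possibility_counter = [0]*count
--
--     for i in range(count):
--         if delays[i] == 0:
--             add_one_to_range(possibility_counter, 0 , count-1)
--         elif delays[i] < count:
--             if i-delays[i] >= 0:
--                 add_one_to_range(possibility_counter, 0, i-delays[i])
--
--             if i != count-1: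
--                 add_one_to_range(possibility_counter, i+1, count-1 if (i-1) >= delays[i] else min((count-delays[i]+i),count-1))
--
--     cur = 0
--     for i in range(count):
--         possibility_counter[i] += cur
--         cur = possibility_counter[i]
--
--     return possibility_counter.index(max(possibility_counter))
-- ===== SOURCE B (Python) =====
-- def Optimal_Start_Place_Eval(delays, count):
--     # Direct range accumulation: increment every position in each satisfied
--     # interval, instead of A's difference-array + prefix-sum technique.
--     counter = [0] * count
--     for i in range(count):
--         d = delays[i]
--         if d == 0:
--             ranges = [(0, count - 1)]
--         elif d < count:
--             ranges = []
--             if i - d >= 0: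
--                 ranges.append((0, min(i - d, count - 1)))
--             if i != count - 1:
--                 ranges.append((i + 1, count - 1 if i - 1 >= d else min(count - d + i, count - 1)))
--         else:
--             ranges = []
--         for lo, hi in ranges:
--             for k in range(lo, hi + 1):
--                 counter[k] += 1
--     return counter.index(max(counter))
-- ===== Notes on version B (the rewrite author's own statement) =====
-- stated objective: simpler
-- what changed: Replaces the difference-array with O(1) endpoint updates followed by an in-place prefix-sum pass by direct accumulation: each satisfied interval is clipped to the valid positions and every position inside it is incremented with a plain inner loop, then the first maximum's index is returned.
import Mathlib
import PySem

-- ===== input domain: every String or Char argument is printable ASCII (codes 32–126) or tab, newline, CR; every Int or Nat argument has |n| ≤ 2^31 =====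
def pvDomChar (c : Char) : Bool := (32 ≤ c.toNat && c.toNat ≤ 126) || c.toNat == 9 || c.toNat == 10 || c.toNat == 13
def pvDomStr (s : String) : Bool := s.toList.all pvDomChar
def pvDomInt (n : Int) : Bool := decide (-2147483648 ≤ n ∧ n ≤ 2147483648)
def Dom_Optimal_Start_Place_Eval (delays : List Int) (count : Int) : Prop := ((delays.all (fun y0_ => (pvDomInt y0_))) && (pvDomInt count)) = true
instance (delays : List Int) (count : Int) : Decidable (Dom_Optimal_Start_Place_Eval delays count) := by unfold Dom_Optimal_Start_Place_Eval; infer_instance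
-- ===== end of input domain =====

-- B replaces A's difference-array (O(1) endpoint updates + prefix-sum pass) by direct
-- per-position accumulation over each clipped interval (simpler, not faster).

-- ===== PORT A =====
def addOneToRange (arr : List Int) (i j : Int) : List Int :=
  let arr1 := PySem.List.pySetD arr i (PySem.List.pyGetD arr i 0 + 1)
  if j < (arr1.length : Int) - 1 then
    PySem.List.pySetD arr1 (j + 1) (PySem.List.pyGetD arr1 (j + 1) 0 - 1)
  else arr1

def aStep (delays : List Int) (count : Int) (pc : List Int) (i : Int) : List Int :=
  if PySem.List.pyGetD delays i 0 = 0 then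
    addOneToRange pc 0 (count - 1)
  else if PySem.List.pyGetD delays i 0 < count then
    let pc := if i - PySem.List.pyGetD delays i 0 ≥ 0 then
        addOneToRange pc 0 (i - PySem.List.pyGetD delays i 0)
      else pc
    if i ≠ count - 1 then
      addOneToRange pc (i + 1)
        (if i - 1 ≥ PySem.List.pyGetD delays i 0 then count - 1
         else min (count - PySem.List.pyGetD delays i 0 + i) (count - 1))
    else pc
  else pc

def aPrefixStep (st : List Int × Int) (i : Int) : List Int × Int :=
  let pc := PySem.List.pySetD st.1 i (PySem.List.pyGetD st.1 i 0 + st.2)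
  (pc, PySem.List.pyGetD pc i 0)

def Optimal_Start_Place_Eval (delays : List Int) (count : Int) : Int :=
  let pc := (PySem.List.pyRange 0 count 1).foldl (aStep delays count) (List.replicate count.toNat 0)
  let st := (PySem.List.pyRange 0 count 1).foldl aPrefixStep (pc, 0)
  match PySem.List.max? st.1 (fun x => x) with
  | some m =>
    match PySem.List.index? st.1 m with
    | some k => (k : Int)
    | none => 0          -- unreachable: the max is a member
  | none => 0            -- Python raises ValueError here (count ≤ 0); excluded by Pre_

-- ===== PORT B =====
def incRange (c : List Int) (lo hi : Int) : List Int :=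
  (PySem.List.pyRange lo (hi + 1) 1).foldl
    (fun c k => PySem.List.pySetD c k (PySem.List.pyGetD c k 0 + 1)) c

def bStep (delays : List Int) (count : Int) (c : List Int) (i : Int) : List Int :=
  let d := PySem.List.pyGetD delays i 0
  let ranges : List (Int × Int) :=
    if d = 0 then [((0 : Int), count - 1)]
    else if d < count then
      (if i - d ≥ 0 then [((0 : Int), min (i - d) (count - 1))] else []) ++
      (if i ≠ count - 1 then
         [(i + 1, if i - 1 ≥ d then count - 1 else min (count - d + i) (count - 1))]
       else [])
    else []
  ranges.foldl (fun c r => incRange c r.1 r.2) c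

def Optimal_Start_Place_Eval_alt (delays : List Int) (count : Int) : Int :=
  let counter := (PySem.List.pyRange 0 count 1).foldl (bStep delays count) (List.replicate count.toNat 0)
  match PySem.List.max? counter (fun x => x) with
  | some m =>
    match PySem.List.index? counter m with
    | some k => (k : Int)
    | none => 0
  | none => 0

-- ===== PRECONDITION & SPEC =====
-- A raises ValueError (max of an empty list) when count < 1 and IndexError when
-- count > len(delays); exactly those inputs are excluded.
def Pre_Optimal_Start_Place_Eval (delays : List Int) (count : Int) : Prop :=
  1 ≤ count ∧ count ≤ (delays.length : Int)
instance (delays : List Int) (count : Int) : Decidable (Pre_Optimal_Start_Place_Eval delays count) := by unfold Pre_Optimal_Start_Place_Eval; infer_instance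
def pvWitness_Optimal_Start_Place_Eval : List Int × Int := ([2, 0, 1], 3)

def Spec_Optimal_Start_Place_Eval (delays : List Int) (count : Int) (out : Int) : Prop := out = Optimal_Start_Place_Eval_alt delays count
instance (delays : List Int) (count : Int) (out : Int) : Decidable (Spec_Optimal_Start_Place_Eval delays count out) := by unfold Spec_Optimal_Start_Place_Eval; infer_instance

-- ===== CLAIM (what is proved, stated in full; the proofs are below) =====
def Claim_equal_Optimal_Start_Place_Eval : Prop := ∀ (delays : List Int) (count : Int), Dom_Optimal_Start_Place_Eval delays count → Pre_Optimal_Start_Place_Eval delays count → Spec_Optimal_Start_Place_Eval delays count (Optimal_Start_Place_Eval delays count)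

-- ===== LEMMAS AND PROOFS =====

-- prefix-sum table: (ps l)[k] = l[0] + … + l[k]
def ps (l : List Int) : List Int := (List.range l.length).map (fun k => (l.take (k + 1)).sum)

theorem length_ps (l : List Int) : (ps l).length = l.length := by simp [ps]

theorem getD_ps (l : List Int) (k : Nat) (hk : k < l.length) :
    (ps l).getD k 0 = (l.take (k + 1)).sum := by
  rw [List.getD_eq_getElem _ _ (by simpa [length_ps] using hk)]
  simp [ps]

theorem sum_set_add (l : List Int) (i : Nat) (h : i < l.length) (c : Int) :
    (l.set i (l[i] + c)).sum = l.sum + c := by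
  induction l generalizing i with
  | nil => simp at h
  | cons x t ih =>
    cases i with
    | zero => simp; ring
    | succ j =>
      simp only [List.set_cons_succ, List.sum_cons, List.getElem_cons_succ]
      rw [ih j (by simpa using h)]; ring

theorem sum_take_set (l : List Int) (p : Nat) (hp : p < l.length) (c : Int) (k : Nat) :
    ((l.set p (l.getD p 0 + c)).take (k + 1)).sum
      = (l.take (k + 1)).sum + if p ≤ k then c else 0 := by
  rw [List.getD_eq_getElem _ _ hp]
  by_cases h : p ≤ k
  · rw [List.take_set, if_pos h]
    have hp' : p < (l.take (k + 1)).length := by simp; omega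
    have := sum_set_add (l.take (k + 1)) p hp' (c := c)
    rw [List.getElem_take] at this
    exact this
  · rw [if_neg h, List.take_set, List.set_eq_of_length_le (by simp; omega)]; ring

theorem getD_set' (l : List Int) (p k : Nat) (v : Int) :
    (l.set p v).getD k 0 = if p = k ∧ k < l.length then v else l.getD k 0 := by
  by_cases hk : k < l.length
  · rw [List.getD_eq_getElem _ _ (by simpa using hk), List.getElem_set]
    by_cases hpk : p = k
    · simp [hpk, hk]
    · rw [if_neg hpk, if_neg (by tauto), List.getD_eq_getElem _ _ hk]
  · have h1 : (l.set p v).getD k 0 = 0 :=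
      List.getD_eq_default (l.set p v) 0 (by rw [List.length_set]; omega)
    have h2 : l.getD k 0 = 0 := List.getD_eq_default l 0 (by omega)
    rw [if_neg (by tauto), h1, h2]

theorem pyGetD_toNat_getD (xs : List Int) (i : Int) (h0 : 0 ≤ i) :
    PySem.List.pyGetD xs i 0 = xs.getD i.toNat 0 := by
  have h : i = ((i.toNat : Nat) : Int) := by omega
  rw [h, PySem.List.pyGetD_natCast, Int.toNat_natCast]

theorem length_addOneToRange (arr : List Int) (i j : Int) :
    (addOneToRange arr i j).length = arr.length := by
  simp only [addOneToRange]
  split <;> simp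

-- pointwise effect of one difference-array update on the prefix sums
theorem sum_take_addOne (arr : List Int) (lo hi : Int) (h0 : 0 ≤ lo)
    (hlo : lo < (arr.length : Int)) (hlh : lo ≤ hi) (k : Nat) (hk : k < arr.length) :
    ((addOneToRange arr lo hi).take (k + 1)).sum
      = (arr.take (k + 1)).sum
        + (if lo ≤ (k : Int) ∧ (k : Int) ≤ min hi ((arr.length : Int) - 1) then 1 else 0) := by
  simp only [addOneToRange]
  rw [PySem.List.pySetD_of_nonneg arr _ h0, pyGetD_toNat_getD arr lo h0]
  by_cases hcond : hi < (((arr.set lo.toNat (arr.getD lo.toNat 0 + 1)).length : Nat) : Int) - 1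
  · rw [if_pos hcond]
    rw [List.length_set] at hcond
    rw [pyGetD_toNat_getD _ (hi + 1) (by omega),
        PySem.List.pySetD_of_nonneg _ _ (show (0:Int) ≤ hi + 1 by omega)]
    rw [show (arr.set lo.toNat (arr.getD lo.toNat 0 + 1)).getD (hi+1).toNat 0 - 1
          = (arr.set lo.toNat (arr.getD lo.toNat 0 + 1)).getD (hi+1).toNat 0 + (-1) by ring]
    rw [sum_take_set _ (hi + 1).toNat (by simp; omega) (-1) k,
        sum_take_set arr lo.toNat (by omega) 1 k, add_assoc]
    congr 1
    split_ifs <;> omega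
  · rw [if_neg hcond]
    rw [List.length_set] at hcond
    rw [sum_take_set arr lo.toNat (by omega) 1 k]
    congr 1
    split_ifs <;> omega

theorem length_incRange (c : List Int) (lo hi : Int) : (incRange c lo hi).length = c.length := by
  unfold incRange
  generalize PySem.List.pyRange lo (hi + 1) 1 = rng
  induction rng generalizing c with
  | nil => rfl
  | cons x t ih => simp only [List.foldl_cons]; rw [ih]; simp

theorem getD_incRange (m : Nat) : ∀ (lo hi : Int) (c : List Int), (hi + 1 - lo).toNat = m →
    0 ≤ lo → hi ≤ (c.length : Int) - 1 → ∀ (k : Nat), k < c.length →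
    (incRange c lo hi).getD k 0
      = c.getD k 0 + (if lo ≤ (k : Int) ∧ (k : Int) ≤ hi then 1 else 0) := by
  induction m with
  | zero =>
    intro lo hi c hm h0 hhi k hk
    have hnil : hi + 1 ≤ lo := by omega
    unfold incRange
    rw [PySem.List.pyRange_one_eq_nil hnil]
    simp only [List.foldl_nil]
    rw [if_neg (by omega), add_zero]
  | succ n ih =>
    intro lo hi c hm h0 hhi k hk
    have hlt : lo < hi + 1 := by omega
    have hlo' : lo.toNat < c.length := by omega
    have estep : incRange c lo hi
        = incRange (PySem.List.pySetD c lo (PySem.List.pyGetD c lo 0 + 1)) (lo + 1) hi := by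
      unfold incRange
      rw [PySem.List.pyRange_one_cons hlt]
      simp only [List.foldl_cons]
    rw [estep, PySem.List.pySetD_of_nonneg c _ h0, pyGetD_toNat_getD c lo h0]
    rw [ih (lo + 1) hi (c.set lo.toNat (c.getD lo.toNat 0 + 1)) (by omega) (by omega)
          (by simp; omega) k (by simp; omega)]
    rw [getD_set']
    by_cases hpk : lo.toNat = k
    · rw [if_pos ⟨hpk, by omega⟩,
          if_neg (show ¬(lo + 1 ≤ (k : Int) ∧ (k : Int) ≤ hi) by omega),
          if_pos (show lo ≤ (k : Int) ∧ (k : Int) ≤ hi by omega), hpk]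
      ring
    · rw [if_neg (by tauto)]
      congr 1
      split_ifs <;> omega

theorem length_bStep (delays : List Int) (count : Int) (c : List Int) (i : Int) :
    (bStep delays count c i).length = c.length := by
  simp only [bStep]
  generalize (if PySem.List.pyGetD delays i 0 = 0 then [((0 : Int), count - 1)]
    else if PySem.List.pyGetD delays i 0 < count then
      (if i - PySem.List.pyGetD delays i 0 ≥ 0 then
        [((0 : Int), min (i - PySem.List.pyGetD delays i 0) (count - 1))] else []) ++
      (if i ≠ count - 1 then
         [(i + 1, if i - 1 ≥ PySem.List.pyGetD delays i 0 then count - 1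
                  else min (count - PySem.List.pyGetD delays i 0 + i) (count - 1))]
       else [])
    else ([] : List (Int × Int))) = rngs
  induction rngs generalizing c with
  | nil => rfl
  | cons r t ih => simp only [List.foldl_cons]; rw [ih]; simp [length_incRange]

theorem length_aStep (delays : List Int) (count : Int) (pc : List Int) (i : Int) :
    (aStep delays count pc i).length = pc.length := by
  simp only [aStep]
  split_ifs <;> simp [length_addOneToRange]

-- one loop iteration: prefix sums of A's diff update = B's direct range increments
theorem step_comm (delays : List Int) (count : Int) (pc : List Int) (i : Int)
    (hlen : (pc.length : Int) = count) (hc : 1 ≤ count) (h0 : 0 ≤ i) (hi : i < count) :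
    ps (aStep delays count pc i) = bStep delays count (ps pc) i := by
  have hpsl : ((ps pc).length : Int) = count := by rw [length_ps]; exact hlen
  apply List.ext_getElem
  · rw [length_ps, length_aStep, length_bStep, length_ps]
  · intro k hk1 hk2
    have hklen : k < pc.length := by rw [length_ps, length_aStep] at hk1; exact hk1
    rw [← List.getD_eq_getElem _ 0, ← List.getD_eq_getElem _ 0]
    rw [getD_ps _ k (by rwa [length_aStep])]
    simp only [aStep, bStep]
    by_cases hd0 : PySem.List.pyGetD delays i 0 = 0
    · rw [if_pos hd0, if_pos hd0]
      simp only [List.foldl_cons, List.foldl_nil]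
      rw [sum_take_addOne pc 0 (count - 1) (by omega) (by omega) (by omega) k hklen]
      rw [getD_incRange ((count - 1) + 1 - 0).toNat 0 (count - 1) (ps pc) rfl (by omega)
            (by omega) k (by rw [length_ps]; exact hklen)]
      rw [getD_ps pc k hklen]
      congr 1
      split_ifs <;> omega
    · rw [if_neg hd0, if_neg hd0]
      by_cases hdc : PySem.List.pyGetD delays i 0 < count
      · rw [if_pos hdc, if_pos hdc]
        set d := PySem.List.pyGetD delays i 0 with hd
        by_cases hidnn : i - d ≥ 0
        · rw [if_pos hidnn, if_pos hidnn]
          by_cases hlast : i ≠ count - 1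
          · rw [if_pos hlast, if_pos hlast]
            simp only [List.cons_append, List.nil_append, List.foldl_cons, List.foldl_nil]
            set H := if i - 1 ≥ d then count - 1 else min (count - d + i) (count - 1) with hH
            have hHa : i + 1 ≤ H := by rw [hH]; split_ifs <;> omega
            have hHb : H ≤ count - 1 := by rw [hH]; split_ifs <;> omega
            rw [sum_take_addOne _ (i + 1) H (by omega)
                  (by rw [length_addOneToRange]; omega) hHa k (by rw [length_addOneToRange]; exact hklen)]
            rw [sum_take_addOne pc 0 (i - d) (by omega) (by omega) (by omega) k hklen]
            rw [getD_incRange (H + 1 - (i + 1)).toNat (i + 1) H _ rfl (by omega)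
                  (by rw [length_incRange]; omega) k
                  (by rw [length_incRange, length_ps]; exact hklen)]
            rw [getD_incRange ((min (i - d) (count - 1)) + 1 - 0).toNat 0 (min (i - d) (count - 1))
                  (ps pc) rfl (by omega) (by omega) k (by rw [length_ps]; exact hklen)]
            rw [getD_ps pc k hklen, length_addOneToRange, add_assoc, add_assoc]
            congr 1
            congr 1
            · split_ifs <;> omega
            · split_ifs <;> omega
          · rw [if_neg hlast, if_neg hlast]
            simp only [List.append_nil, List.foldl_cons, List.foldl_nil]
            rw [sum_take_addOne pc 0 (i - d) (by omega) (by omega) (by omega) k hklen]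
            rw [getD_incRange ((min (i - d) (count - 1)) + 1 - 0).toNat 0 (min (i - d) (count - 1))
                  (ps pc) rfl (by omega) (by omega) k (by rw [length_ps]; exact hklen)]
            rw [getD_ps pc k hklen]
            congr 1
            split_ifs <;> omega
        · rw [if_neg hidnn, if_neg hidnn]
          by_cases hlast : i ≠ count - 1
          · rw [if_pos hlast, if_pos hlast]
            simp only [List.nil_append, List.foldl_cons, List.foldl_nil]
            set H := if i - 1 ≥ d then count - 1 else min (count - d + i) (count - 1) with hH
            have hHa : i + 1 ≤ H := by rw [hH]; split_ifs <;> omega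
            have hHb : H ≤ count - 1 := by rw [hH]; split_ifs <;> omega
            rw [sum_take_addOne pc (i + 1) H (by omega) (by omega) hHa k hklen]
            rw [getD_incRange (H + 1 - (i + 1)).toNat (i + 1) H (ps pc) rfl (by omega)
                  (by omega) k (by rw [length_ps]; exact hklen)]
            rw [getD_ps pc k hklen]
            congr 1
            split_ifs <;> omega
          · rw [if_neg hlast, if_neg hlast]
            simp only [List.append_nil, List.foldl_nil]
            rw [getD_ps pc k hklen]
      · rw [if_neg hdc, if_neg hdc]
        simp only [List.foldl_nil]
        rw [getD_ps pc k hklen]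

theorem length_foldA (delays : List Int) (count : Int) (rng : List Int) (init : List Int) :
    (rng.foldl (aStep delays count) init).length = init.length := by
  induction rng generalizing init with
  | nil => rfl
  | cons x t ih => simp only [List.foldl_cons]; rw [ih, length_aStep]

theorem ps_replicate (n : Nat) : ps (List.replicate n (0 : Int)) = List.replicate n 0 := by
  apply List.ext_getElem
  · simp [length_ps]
  · intro k hk1 hk2
    simp [ps, List.take_replicate, List.sum_replicate] at hk1 ⊢

-- the whole update loop commutes with taking prefix sums
theorem chain (delays : List Int) (count : Int) (hc : 1 ≤ count) :
    ∀ (m : Nat), (m : Int) ≤ count →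
      ps ((PySem.List.pyRange 0 (m : Int) 1).foldl (aStep delays count)
            (List.replicate count.toNat 0))
        = (PySem.List.pyRange 0 (m : Int) 1).foldl (bStep delays count)
            (List.replicate count.toNat 0) := by
  intro m
  induction m with
  | zero =>
    intro _
    rw [PySem.List.pyRange_one_eq_nil (by omega)]
    simp only [List.foldl_nil]
    exact ps_replicate count.toNat
  | succ n ih =>
    intro hm
    have hn : (n : Int) ≤ count := by push_cast at hm ⊢; omega
    have hsplit : PySem.List.pyRange 0 ((n : Nat) + 1 : Int) 1
        = PySem.List.pyRange 0 (n : Int) 1 ++ [(n : Int)] := by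
      rw [PySem.List.pyRange_one_succ_right (by omega)]
    rw [show (((n + 1 : Nat)) : Int) = ((n : Nat) : Int) + 1 by push_cast; ring, hsplit]
    simp only [List.foldl_append, List.foldl_cons, List.foldl_nil]
    rw [← ih hn]
    exact step_comm delays count _ (n : Int)
      (by rw [length_foldA, List.length_replicate]; omega) hc (by omega) (by push_cast at hm; omega)

-- A's in-place running-sum pass computes exactly the prefix-sum table
theorem prefix_loop (m : Nat) : ∀ (a : Nat) (pc : List Int) (cur : Int), pc.length = a + m →
    (((PySem.List.pyRange (a : Int) ((a : Int) + (m : Int)) 1).foldl aPrefixStep (pc, cur)).1.length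
        = pc.length) ∧
    (∀ (k : Nat), k < pc.length →
      ((PySem.List.pyRange (a : Int) ((a : Int) + (m : Int)) 1).foldl aPrefixStep (pc, cur)).1.getD k 0
        = if k < a then pc.getD k 0 else cur + ((pc.take (k + 1)).sum - (pc.take a).sum)) := by
  induction m with
  | zero =>
    intro a pc cur hlen
    rw [show ((a : Int) + ((0 : Nat) : Int)) = (a : Int) by push_cast; ring,
        PySem.List.pyRange_one_eq_nil (by omega)]
    simp only [List.foldl_nil]
    constructor
    · trivial
    · intro k hk
      rw [if_pos (show k < a by omega)]
  | succ n ih =>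
    intro a pc cur hlen
    have ha : a < pc.length := by omega
    have hcons : PySem.List.pyRange (a : Int) ((a : Int) + ((n + 1 : Nat) : Int)) 1
        = (a : Int) :: PySem.List.pyRange ((a : Int) + 1) ((a : Int) + ((n + 1 : Nat) : Int)) 1 := by
      rw [PySem.List.pyRange_one_cons (by push_cast; omega)]
    rw [hcons]
    simp only [List.foldl_cons]
    have hstep : aPrefixStep (pc, cur) (a : Int)
        = (pc.set a (pc.getD a 0 + cur), pc.getD a 0 + cur) := by
      simp only [aPrefixStep]
      rw [PySem.List.pySetD_of_nonneg pc _ (by omega), pyGetD_toNat_getD pc (a : Int) (by omega),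
          pyGetD_toNat_getD _ (a : Int) (by omega)]
      rw [Int.toNat_natCast, getD_set', if_pos ⟨rfl, ha⟩]
    rw [hstep]
    have hre : (a : Int) + ((n + 1 : Nat) : Int) = ((a + 1 : Nat) : Int) + ((n : Nat) : Int) := by
      push_cast; ring
    rw [show ((a : Int) + 1) = ((a + 1 : Nat) : Int) by push_cast; ring, hre]
    obtain ⟨ihlen, ihget⟩ := ih (a + 1) (pc.set a (pc.getD a 0 + cur)) (pc.getD a 0 + cur)
      (by simp; omega)
    constructor
    · rw [ihlen]; simp
    · intro k hk
      rw [ihget k (by simp; omega)]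
      by_cases hka : k < a
      · rw [if_pos (by omega), if_pos hka, getD_set', if_neg (by omega)]
      · by_cases hkea : k = a
        · subst hkea
          rw [if_pos (by omega), if_neg (by omega), getD_set', if_pos ⟨rfl, ha⟩]
          rw [List.sum_take_succ pc k ha, List.getD_eq_getElem pc 0 ha]
          ring
        · rw [if_neg (by omega), if_neg (by omega)]
          rw [sum_take_set pc a ha cur k, if_pos (by omega)]
          have h2 : ((pc.set a (pc.getD a 0 + cur)).take (a + 1)).sum
              = (pc.take (a + 1)).sum + cur := by
            rw [sum_take_set pc a ha cur a, if_pos (by omega)]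
          rw [h2, List.sum_take_succ pc a ha, List.getD_eq_getElem pc 0 ha]
          ring

-- ===== VERDICT (by name: the statement is the Claim_ definition above) =====
theorem Optimal_Start_Place_Eval_spec : Claim_equal_Optimal_Start_Place_Eval := by
  intro delays count _ hpre
  obtain ⟨hc, hlen⟩ := hpre
  unfold Spec_Optimal_Start_Place_Eval
  simp only [Optimal_Start_Place_Eval, Optimal_Start_Place_Eval_alt]
  have hcnt : (count.toNat : Int) = count := by omega
  set pcA := (PySem.List.pyRange 0 count 1).foldl (aStep delays count)
      (List.replicate count.toNat 0) with hpcA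
  have hlenA : pcA.length = count.toNat := by
    rw [hpcA, length_foldA, List.length_replicate]
  have hst : ((PySem.List.pyRange 0 count 1).foldl aPrefixStep (pcA, 0)).1 = ps pcA := by
    obtain ⟨hl, hg⟩ := prefix_loop count.toNat 0 pcA 0 (by omega)
    simp only [Nat.cast_zero, zero_add, hcnt] at hl hg
    apply List.ext_getElem
    · rw [hl, length_ps]
    · intro k hk1 hk2
      rw [← List.getD_eq_getElem _ 0, ← List.getD_eq_getElem _ 0]
      rw [hg k (by omega), getD_ps pcA k (by omega)]
      simp
  have hchain : ps pcA = (PySem.List.pyRange 0 count 1).foldl (bStep delays count)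
      (List.replicate count.toNat 0) := by
    have h := chain delays count hc count.toNat (by omega)
    rw [hcnt] at h
    exact h
  rw [hst, hchain]
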